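-- pv_equiv track=rewrite | github.com/MedAzizTousli/rmhq-bot | rematch_hq_bot/views.py | _parse_tournament_name_url_block
-- ===== SOURCE A (Python) =====
-- def _split_org_and_name(raw: str) -> tuple[str, str] | None:
--     # Expect: "ORG | Tournament name"
--     s = raw.strip()
--     if "|" not in s:
--         return None
--     org, name = (part.strip() for part in s.split("|", 1))
--     if not org or not name:
--         return None
--     return org, name
--
-- def _parse_tournament_name_url_block(raw: str) -> tuple[tuple[str, str] | None, str | None, str | None]:
--     """
--     Two-line (or more) block: first line `ORG | Name`, another line tournament URL (https...).
--     Returns ((org, name), url, error_message).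
--     """
--     lines = [ln.strip() for ln in (raw or "").splitlines() if ln.strip()]
--     name_line: str | None = None
--     url_line: str | None = None
--     for ln in lines:
--         low = ln.lower()
--         if low.startswith("http://") or low.startswith("https://"):
--             if url_line is None:
--                 url_line = ln.strip()
--             continue
--         if "|" in ln:
--             parsed = _split_org_and_name(ln)
--             if parsed and name_line is None:
--                 name_line = ln
--     if not name_line:
--         return None, None, (
--             "Line 1: `ORG | Tournament name` (e.g. `MRC | Rematch Weekly #12`).\n"
--             "Line 2: tournament URL starting with `https://`."
--         )
--     org_name = _split_org_and_name(name_line)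
--     if not org_name:
--         return None, None, "Tournament line must look like `ORG | Tournament name`."
--     if not url_line:
--         return None, None, "Add the tournament URL on its own line (starting with `https://`)."
--     return org_name, url_line, None
-- ===== SOURCE B (Python) =====
-- def _split_org_and_name(raw: str) -> tuple[str, str] | None:
--     # Expect: "ORG | Tournament name"
--     s = raw.strip()
--     if "|" not in s:
--         return None
--     org, name = (part.strip() for part in s.split("|", 1))
--     if not org or not name:
--         return None
--     return org, name
--
--
-- def _is_http(ln: str) -> bool:
--     low = ln.lower()
--     return low.startswith("http://") or low.startswith("https://")
--
--
-- def _parse_tournament_name_url_block(raw: str) -> tuple[tuple[str, str] | None, str | None, str | None]: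
--     lines = [ln.strip() for ln in (raw or "").splitlines() if ln.strip()]
--     url = next((ln for ln in lines if _is_http(ln)), None)
--     pair = next(
--         (p for p in map(_split_org_and_name, (ln for ln in lines if not _is_http(ln))) if p is not None),
--         None,
--     )
--     if pair is None:
--         return None, None, (
--             "Line 1: `ORG | Tournament name` (e.g. `MRC | Rematch Weekly #12`).\n"
--             "Line 2: tournament URL starting with `https://`."
--         )
--     if url is None:
--         return None, None, "Add the tournament URL on its own line (starting with `https://`)."
--     return pair, url, None
-- ===== Notes on version B (the rewrite author's own statement) =====
-- stated objective: simpler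
-- what changed: Replaces A's single stateful fold carrying (name_line, url_line) with two independent first-match scans (find? for the first http(s) line, findSome? over the non-http lines for the first valid ORG|name parse) and drops A's unreachable re-parse error branch.
import Mathlib
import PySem

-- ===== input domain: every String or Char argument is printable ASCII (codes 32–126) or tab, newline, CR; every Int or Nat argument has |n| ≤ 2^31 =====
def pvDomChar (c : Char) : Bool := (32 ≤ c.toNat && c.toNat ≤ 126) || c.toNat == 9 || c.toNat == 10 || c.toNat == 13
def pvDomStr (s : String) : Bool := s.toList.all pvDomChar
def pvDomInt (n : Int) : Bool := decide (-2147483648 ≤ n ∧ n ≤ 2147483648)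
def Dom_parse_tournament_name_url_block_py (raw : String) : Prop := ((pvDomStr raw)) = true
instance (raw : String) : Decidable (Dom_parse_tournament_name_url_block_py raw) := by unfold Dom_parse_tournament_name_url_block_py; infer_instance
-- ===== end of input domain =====

-- B replaces A's single stateful accumulator loop by two independent first-match scans
-- (find? for the URL line, findSome? over the non-URL lines for the ORG|name pair) and drops
-- A's unreachable second-parse error branch; objective: simpler.

-- ===== PORT A =====
-- helper _split_org_and_name (same module, used by both Python versions verbatim)
def pySplitOrgAndName (raw : String) : Option (String × String) :=
  let s := PySem.Str.strip raw
  if PySem.Str.isIn "|" s = false then none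
  else
    match (PySem.Str.splitMax? s "|" 1).getD [] with
    | o :: n :: _ =>
      let org := PySem.Str.strip o
      let name := PySem.Str.strip n
      if org = "" || name = "" then none else some (org, name)
    | _ => none   -- unreachable: "|" in s guarantees two parts

-- loop body of A's for-loop over the cleaned lines (state = (name_line, url_line))
def pyParseStep (st : Option String × Option String) (ln : String) :
    Option String × Option String :=
  let low := PySem.Str.lower ln
  if PySem.Str.startswith low "http://" || PySem.Str.startswith low "https://" then
    (st.1, if st.2 = none then some (PySem.Str.strip ln) else st.2)
  else if PySem.Str.isIn "|" ln then
    match pySplitOrgAndName ln with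
    | some _ => (if st.1 = none then some ln else st.1, st.2)
    | none => st
  else st

def parse_tournament_name_url_block_py (raw : String) :
    (Option (String × String)) × Option String × Option String :=
  let lines := ((PySem.Str.splitlines raw).map PySem.Str.strip).filter (fun ln => !(ln == ""))
  let st := lines.foldl pyParseStep (none, none)
  match st.1 with
  | none => (none, none, some "Line 1: `ORG | Tournament name` (e.g. `MRC | Rematch Weekly #12`).\nLine 2: tournament URL starting with `https://`.")
  | some nl =>
    match pySplitOrgAndName nl with
    | none => (none, none, some "Tournament line must look like `ORG | Tournament name`.")
    | some on =>
      match st.2 with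
      | none => (none, none, some "Add the tournament URL on its own line (starting with `https://`).")
      | some url => (some on, some url, none)

-- ===== PORT B =====
def pyIsHttp (ln : String) : Bool :=
  let low := PySem.Str.lower ln
  PySem.Str.startswith low "http://" || PySem.Str.startswith low "https://"

def parse_tournament_name_url_block_py_alt (raw : String) :
    (Option (String × String)) × Option String × Option String :=
  let lines := ((PySem.Str.splitlines raw).map PySem.Str.strip).filter (fun ln => !(ln == ""))
  let url := lines.find? pyIsHttp
  let pair := (lines.filter (fun ln => !pyIsHttp ln)).findSome? pySplitOrgAndName
  match pair with
  | none => (none, none, some "Line 1: `ORG | Tournament name` (e.g. `MRC | Rematch Weekly #12`).\nLine 2: tournament URL starting with `https://`.")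
  | some on =>
    match url with
    | none => (none, none, some "Add the tournament URL on its own line (starting with `https://`).")
    | some u => (some on, some u, none)

-- ===== PRECONDITION & SPEC =====
def Spec_parse_tournament_name_url_block_py (raw : String) (out : (Option (String × String)) × Option String × Option String) : Prop := out = parse_tournament_name_url_block_py_alt raw
instance (raw : String) (out : (Option (String × String)) × Option String × Option String) : Decidable (Spec_parse_tournament_name_url_block_py raw out) := by unfold Spec_parse_tournament_name_url_block_py; infer_instance

-- ===== CLAIM (what is proved, stated in full; the proofs are below) =====
def Claim_equal_parse_tournament_name_url_block_py : Prop := ∀ (raw : String), Dom_parse_tournament_name_url_block_py raw → Spec_parse_tournament_name_url_block_py raw (parse_tournament_name_url_block_py raw)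

-- ===== LEMMAS AND PROOFS =====

-- "first non-URL line that parses" predicate (proof-only helper)
def pvGoodName (ln : String) : Bool := !pyIsHttp ln && (pySplitOrgAndName ln).isSome

lemma pv_dropWhile_eq_self_of_prefix {p : Char → Bool} {l₁ l₂ : List Char}
    (h : l₁ <+: l₂) (h2 : l₂.dropWhile p = l₂) : l₁.dropWhile p = l₁ := by
  rw [List.dropWhile_eq_self_iff] at *
  cases l₁ with
  | nil => simp
  | cons a t => obtain ⟨r, hr⟩ := h; subst hr; simpa using h2

lemma pv_chars_strip_idem (s : List Char) :
    PySem.Chars.strip (PySem.Chars.strip s) = PySem.Chars.strip s := by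
  unfold PySem.Chars.strip PySem.Chars.rstrip PySem.Chars.lstrip
  have h1 : List.dropWhile PySem.Chars.isspace (List.dropWhile PySem.Chars.isspace s)
      = List.dropWhile PySem.Chars.isspace s := List.dropWhile_idempotent _ s
  have hpre : (List.dropWhile PySem.Chars.isspace (List.dropWhile PySem.Chars.isspace s).reverse).reverse
      <+: List.dropWhile PySem.Chars.isspace s := by
    have := List.reverse_prefix.mpr
      (List.dropWhile_suffix (l := (List.dropWhile PySem.Chars.isspace s).reverse) PySem.Chars.isspace)
    simpa using this
  have h2 := pv_dropWhile_eq_self_of_prefix hpre h1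
  rw [h2, List.reverse_reverse, List.dropWhile_idempotent]

lemma pv_str_strip_idem (s : String) :
    PySem.Str.strip (PySem.Str.strip s) = PySem.Str.strip s := by
  simp [PySem.Str.strip, String.toList_ofList, pv_chars_strip_idem]

lemma pv_mem_lines_strip (raw : String) (x : String)
    (hx : x ∈ ((PySem.Str.splitlines raw).map PySem.Str.strip).filter (fun ln => !(ln == ""))) :
    PySem.Str.strip x = x := by
  have hx' := List.mem_of_mem_filter hx
  obtain ⟨y, _, hy⟩ := List.mem_map.mp hx'
  rw [← hy, pv_str_strip_idem]

lemma pv_split_none_of_not_isIn (x : String) (hx : PySem.Str.strip x = x)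
    (hin : PySem.Str.isIn "|" x = false) : pySplitOrgAndName x = none := by
  unfold pySplitOrgAndName
  rw [hx]
  simp only [hin]
  simp

lemma pv_foldA (L : List String) (h : ∀ x ∈ L, PySem.Str.strip x = x)
    (n? u? : Option String) :
    L.foldl pyParseStep (n?, u?)
    = (n?.orElse (fun _ => L.find? pvGoodName), u?.orElse (fun _ => L.find? pyIsHttp)) := by
  induction L generalizing n? u? with
  | nil => cases n? <;> cases u? <;> rfl
  | cons x xs ih =>
    have hx := h x List.mem_cons_self
    have h' : ∀ y ∈ xs, PySem.Str.strip y = y := fun y hy => h y (List.mem_cons_of_mem _ hy)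
    by_cases hh : pyIsHttp x = true
    · have hg : pvGoodName x = false := by simp [pvGoodName, hh]
      have hcond : (PySem.Str.startswith (PySem.Str.lower x) "http://"
          || PySem.Str.startswith (PySem.Str.lower x) "https://") = true := by
        simpa [pyIsHttp] using hh
      rw [List.foldl_cons]
      have hstep : pyParseStep (n?, u?) x = (n?, if u? = none then some x else u?) := by
        simp only [pyParseStep, hcond, if_true, hx]
      rw [hstep, ih h',
        List.find?_cons_of_neg (by simp [hg]), List.find?_cons_of_pos hh]
      cases n? <;> cases u? <;> rfl
    · have hcond : (PySem.Str.startswith (PySem.Str.lower x) "http://"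
          || PySem.Str.startswith (PySem.Str.lower x) "https://") = false := by
        simpa [pyIsHttp] using hh
      by_cases hin : PySem.Str.isIn "|" x = true
      · cases hf : pySplitOrgAndName x with
        | some on =>
          have hg : pvGoodName x = true := by simp [pvGoodName, hh, hf]
          rw [List.foldl_cons]
          have hstep : pyParseStep (n?, u?) x = (if n? = none then some x else n?, u?) := by
            simp only [pyParseStep, hcond, Bool.false_eq_true, if_false, hin, if_true, hf]
          rw [hstep, ih h',
            List.find?_cons_of_pos hg, List.find?_cons_of_neg (by simp [hh])]
          cases n? <;> cases u? <;> rfl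
        | none =>
          have hg : pvGoodName x = false := by simp [pvGoodName, hh, hf]
          rw [List.foldl_cons]
          have hstep : pyParseStep (n?, u?) x = (n?, u?) := by
            simp only [pyParseStep, hcond, Bool.false_eq_true, if_false, hin, if_true, hf]
          rw [hstep, ih h',
            List.find?_cons_of_neg (by simp [hg]), List.find?_cons_of_neg (by simp [hh])]
      · have hin' : PySem.Str.isIn "|" x = false := by simpa using hin
        have hf : pySplitOrgAndName x = none := pv_split_none_of_not_isIn x hx hin'
        have hg : pvGoodName x = false := by simp [pvGoodName, hh, hf]
        rw [List.foldl_cons]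
        have hstep : pyParseStep (n?, u?) x = (n?, u?) := by
          simp only [pyParseStep, hcond, Bool.false_eq_true, if_false, hin', if_false]
        rw [hstep, ih h',
          List.find?_cons_of_neg (by simp [hg]), List.find?_cons_of_neg (by simp [hh])]

lemma pv_findSome_filter (L : List String) :
    (L.filter (fun ln => !pyIsHttp ln)).findSome? pySplitOrgAndName
    = (L.find? pvGoodName).bind pySplitOrgAndName := by
  induction L with
  | nil => rfl
  | cons x xs ih =>
    by_cases hh : pyIsHttp x = true
    · rw [List.find?_cons_of_neg (by simp [pvGoodName, hh])]
      simpa [List.filter_cons, hh] using ih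
    · cases hf : pySplitOrgAndName x with
      | some y =>
        rw [List.find?_cons_of_pos (by simp [pvGoodName, hh, hf])]
        simp [hh, hf]
      | none =>
        rw [List.find?_cons_of_neg (by simp [pvGoodName, hh, hf])]
        simpa [List.filter_cons, hh, List.findSome?_cons, hf] using ih

-- ===== VERDICT (by name: the statement is the Claim_ definition above) =====
theorem parse_tournament_name_url_block_py_spec : Claim_equal_parse_tournament_name_url_block_py := by
  intro raw _
  unfold Spec_parse_tournament_name_url_block_py
  unfold parse_tournament_name_url_block_py parse_tournament_name_url_block_py_alt
  dsimp only
  set L := ((PySem.Str.splitlines raw).map PySem.Str.strip).filter (fun ln => !(ln == "")) with hL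
  have hmem : ∀ x ∈ L, PySem.Str.strip x = x := fun x hx => pv_mem_lines_strip raw x (hL ▸ hx)
  rw [pv_foldA L hmem none none, pv_findSome_filter L]
  simp only [Option.orElse_none]
  cases hfind : L.find? pvGoodName with
  | none => simp
  | some nl =>
    have hgood : pvGoodName nl = true := List.find?_some hfind
    have hsome : (pySplitOrgAndName nl).isSome := by
      simp [pvGoodName] at hgood; exact hgood.2
    cases hf : pySplitOrgAndName nl with
    | none => rw [hf] at hsome; simp at hsome
    | some on => simp [hf]
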